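-- pv_equiv track=rewrite | github.com/AshwinHarishP/Coding-Ninjas | Python /Dynamic Programming/Longest String Chain.py | longest_string
-- ===== SOURCE A (Python) =====
-- def check(s1, s2):
--     if len(s1) != len(s2) + 1:
--         return False
--
--     first, second = 0, 0
--     inserted = False
--
--     while second < len(s2):
--         if s1[first] == s2[second]:
--             first += 1
--             second += 1
--         elif not inserted:
--             inserted = True
--             first += 1
--         else:
--             return False
--
--     return True
--
-- def longest_string(arr):
--     n = len(arr)
--     dp = [1] * n
--     maxi = -1
--
--     for i in range(n):
--         for prev_index in range(i):
--             if check(arr[i], arr[prev_index]) and 1 + dp[prev_index] > dp[i]: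
--                 dp[i] = 1 + dp[prev_index]
--
--         if dp[i] > maxi:
--             maxi = dp[i]
--
--     return maxi
-- ===== SOURCE B (Python) =====
-- def longest_string(arr):
--     best = {}
--     maxi = -1
--     for w in arr:
--         cur = 1
--         for j in range(len(w)):
--             d = w[:j] + w[j+1:]
--             if d in best and best[d] + 1 > cur:
--                 cur = best[d] + 1
--         if cur > best.get(w, 0):
--             best[w] = cur
--         if cur > maxi:
--             maxi = cur
--     return maxi
-- ===== Notes on version B (the rewrite author's own statement) =====
-- stated objective: faster
-- what changed: Replaces A's O(n^2) pairwise predecessor scan (each pair checked with a two-pointer subsequence test) by a single pass that keeps a dict from word to its best chain length and probes the len(w) one-character deletions of each word.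
import Mathlib
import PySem

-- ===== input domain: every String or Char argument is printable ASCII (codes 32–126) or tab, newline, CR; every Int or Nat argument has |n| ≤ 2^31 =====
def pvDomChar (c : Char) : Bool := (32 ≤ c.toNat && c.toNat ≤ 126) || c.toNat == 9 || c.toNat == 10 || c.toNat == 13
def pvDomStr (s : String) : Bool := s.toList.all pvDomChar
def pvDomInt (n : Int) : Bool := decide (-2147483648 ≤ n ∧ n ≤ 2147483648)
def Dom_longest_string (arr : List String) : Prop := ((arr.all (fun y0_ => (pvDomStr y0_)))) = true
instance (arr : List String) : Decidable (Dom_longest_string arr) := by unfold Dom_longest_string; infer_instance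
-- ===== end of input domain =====

-- B replaces A's quadratic scan over all previous words by a dict of word -> best chain length,
-- probing the len(w) one-character deletions of each word (objective: faster).

-- ===== PORT A =====
-- the 'while second < len(s2)' loop of check, on indices first/second (Nat: both start at 0 and
-- only increase).  When 'first' runs past the end of s1 (unreachable from check's entry, where
-- len(s1) = len(s2)+1), a[f]? = none and the comparison with some b[s] is false, as in no-match.
def checkLoop (a b : List Char) (f s : Nat) (ins : Bool) : Bool :=
  if h : s < b.length then
    if a[f]? = some b[s] then checkLoop a b (f + 1) (s + 1) ins
    else if ins = false then checkLoop a b (f + 1) s true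
    else false
  else true
termination_by (b.length - s) + (if ins then 0 else 1)
decreasing_by
  all_goals (cases ins <;> simp_all <;> omega)

def check (s1 s2 : String) : Bool :=
  if s1.toList.length ≠ s2.toList.length + 1 then false
  else checkLoop s1.toList s2.toList 0 0 false

-- the 'for prev_index in range(i)' loop computing dp[i] (reads/writes of dp[i] are the accumulator)
def innerA (arr : List String) (dp : List Int) (i : Nat) : Int :=
  (List.range i).foldl
    (fun dpi p => if check (arr.getD i "") (arr.getD p "") ∧ 1 + dp.getD p 0 > dpi then 1 + dp.getD p 0 else dpi)
    (dp.getD i 0)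

-- one iteration of the 'for i in range(n)' loop; state = (dp, maxi)
def stepA (arr : List String) (st : List Int × Int) (i : Nat) : List Int × Int :=
  let dpi := innerA arr st.1 i
  (st.1.set i dpi, if dpi > st.2 then dpi else st.2)

def longest_string (arr : List String) : Int :=
  ((List.range arr.length).foldl (stepA arr) (List.replicate arr.length 1, -1)).2

-- ===== PORT B =====
-- w[:j] + w[j+1:] (Python str concatenation is list append on the code points)
def delete_at (w : String) (j : Nat) : String :=
  String.ofList (PySem.List.slice w.toList none (some (j : Int)) ++
                 PySem.List.slice w.toList (some ((j : Int) + 1)) none)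

-- the 'for j in range(len(w))' loop: cur = best chain ending at w via its one-char deletions
def innerB (best : PySem.Dict String Int) (w : String) : Int :=
  (List.range w.toList.length).foldl
    (fun cur j => if best.contains (delete_at w j) ∧ best.getD (delete_at w j) 0 + 1 > cur then best.getD (delete_at w j) 0 + 1 else cur)
    1

-- one iteration of the 'for w in arr' loop; state = (best, maxi)
def stepB (st : PySem.Dict String Int × Int) (w : String) : PySem.Dict String Int × Int :=
  let cur := innerB st.1 w
  (if cur > st.1.getD w 0 then st.1.insert w cur else st.1,
   if cur > st.2 then cur else st.2)

def longest_string_alt (arr : List String) : Int :=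
  (arr.foldl stepB (PySem.Dict.empty, -1)).2

-- ===== PRECONDITION & SPEC =====
def Spec_longest_string (arr : List String) (out : Int) : Prop := out = longest_string_alt arr
instance (arr : List String) (out : Int) : Decidable (Spec_longest_string arr out) := by unfold Spec_longest_string; infer_instance

-- ===== CLAIM (what is proved, stated in full; the proofs are below) =====
def Claim_equal_longest_string : Prop := ∀ (arr : List String), Dom_longest_string arr → Spec_longest_string arr (longest_string arr)

-- ===== LEMMAS AND PROOFS =====

-- checkLoop only looks at the suffixes a.drop f / b.drop s: the abstract greedy matcher
def greedy : List Char → List Char → Bool → Bool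
  | _, [], _ => true
  | [], _ :: _, _ => false
  | x :: a', y :: b', ins =>
      if x = y then greedy a' b' ins
      else if ins then false else greedy a' (y :: b') true

lemma greedy_nil_b (a : List Char) (ins : Bool) : greedy a [] ins = true := by
  cases a <;> rfl

lemma greedy_nil_a (y : Char) (b' : List Char) (ins : Bool) : greedy [] (y :: b') ins = false := rfl

lemma greedy_cons_eq (x : Char) (a' b' : List Char) (ins : Bool) :
    greedy (x :: a') (x :: b') ins = greedy a' b' ins := by simp [greedy]

lemma greedy_cons_ne {x y : Char} (a' b' : List Char) (h : x ≠ y) :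
    greedy (x :: a') (y :: b') true = false := by simp [greedy, h]

lemma greedy_cons_ne_false {x y : Char} (a' b' : List Char) (h : x ≠ y) :
    greedy (x :: a') (y :: b') false = greedy a' (y :: b') true := by simp [greedy, h]

lemma checkLoop_eq_greedy (a b : List Char) (f s : Nat) (ins : Bool) :
    checkLoop a b f s ins = greedy (a.drop f) (b.drop s) ins := by
  fun_induction checkLoop a b f s ins with
  | case1 f s ins h hx ih =>
      obtain ⟨hf, hval⟩ := List.getElem?_eq_some_iff.mp hx
      rw [ih, List.drop_eq_getElem_cons h, List.drop_eq_getElem_cons hf, hval, greedy_cons_eq]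
  | case2 f s h hx ih =>
      rw [ih]
      rcases hfa : a[f]? with _ | x
      · have hf : a.length ≤ f := List.getElem?_eq_none_iff.mp hfa
        rw [List.drop_eq_nil_of_le hf, List.drop_eq_nil_of_le (show a.length ≤ f + 1 by omega),
          List.drop_eq_getElem_cons h, greedy_nil_a, greedy_nil_a]
      · obtain ⟨hf, hval⟩ := List.getElem?_eq_some_iff.mp hfa
        have hne : a[f] ≠ b[s] := fun he => hx (by rw [List.getElem?_eq_getElem hf, he])
        rw [List.drop_eq_getElem_cons hf, List.drop_eq_getElem_cons h, greedy_cons_ne_false _ _ hne]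
  | case3 f s ins h hx hins =>
      have hins' : ins = true := by cases ins <;> simp_all
      subst hins'
      rcases hfa : a[f]? with _ | x
      · have hf : a.length ≤ f := List.getElem?_eq_none_iff.mp hfa
        rw [List.drop_eq_nil_of_le hf, List.drop_eq_getElem_cons h, greedy_nil_a]
      · obtain ⟨hf, hval⟩ := List.getElem?_eq_some_iff.mp hfa
        have hne : a[f] ≠ b[s] := fun he => hx (by rw [List.getElem?_eq_getElem hf, he])
        rw [List.drop_eq_getElem_cons hf, List.drop_eq_getElem_cons h, greedy_cons_ne _ _ hne]
  | case4 f s ins h =>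
      rw [List.drop_eq_nil_of_le (show b.length ≤ s by omega), greedy_nil_b]

lemma greedy_true_iff (b a : List Char) : greedy a b true = true ↔ b <+: a := by
  induction b generalizing a with
  | nil => simp [greedy_nil_b]
  | cons y b' ih =>
      cases a with
      | nil => simp [greedy_nil_a]
      | cons x a' =>
          by_cases hxy : x = y
          · subst hxy
            rw [greedy_cons_eq, ih, List.cons_prefix_cons]
            simp
          · rw [greedy_cons_ne _ _ hxy, List.cons_prefix_cons]
            exact iff_of_false (by simp) (fun h => hxy h.1.symm)

lemma greedy_false_iff (b a : List Char) (hlen : a.length = b.length + 1) :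
    (greedy a b false = true ↔ ∃ j, j < a.length ∧ b = a.eraseIdx j) := by
  induction b generalizing a with
  | nil =>
      cases a with
      | nil => simp at hlen
      | cons x a' =>
          have : a' = [] := by simpa using hlen
          subst this
          simp [greedy]
  | cons y b' ih =>
      cases a with
      | nil => simp at hlen
      | cons x a' =>
          have hlen' : a'.length = b'.length + 1 := by simpa using hlen
          by_cases hxy : x = y
          · subst hxy
            rw [greedy_cons_eq, ih a' hlen']
            constructor
            · rintro ⟨j, hj, hb⟩
              exact ⟨j + 1, by simpa using Nat.succ_lt_succ hj, by simp [List.eraseIdx_cons_succ, hb]⟩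
            · rintro ⟨j, hj, hb⟩
              cases j with
              | zero =>
                  simp only [List.eraseIdx_cons_zero] at hb
                  refine ⟨0, by omega, ?_⟩
                  cases a' with
                  | nil => simp at hlen'
                  | cons z a'' => simp_all
              | succ j' =>
                  simp only [List.eraseIdx_cons_succ, List.cons.injEq] at hb
                  exact ⟨j', by simpa using hj, hb.2⟩
          · rw [greedy_cons_ne_false _ _ hxy, greedy_true_iff]
            constructor
            · intro hpre
              have : y :: b' = a' :=
                List.IsPrefix.eq_of_length hpre (by simpa using hlen'.symm)
              exact ⟨0, by omega, by simp [this]⟩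
            · rintro ⟨j, hj, hb⟩
              cases j with
              | zero =>
                  simp only [List.eraseIdx_cons_zero] at hb
                  simp [← hb]
              | succ j' =>
                  simp only [List.eraseIdx_cons_succ, List.cons.injEq] at hb
                  exact absurd hb.1.symm hxy

lemma toList_delete_at (w : String) (j : Nat) :
    (delete_at w j).toList = (w.toList).eraseIdx j := by
  have h1 : PySem.List.slice w.toList none (some (j : Int)) = w.toList.take j :=
    PySem.List.slice_to_natCast w.toList j
  have h2 : PySem.List.slice w.toList (some ((j : Int) + 1)) none = w.toList.drop (j + 1) := by
    have := PySem.List.slice_from_natCast w.toList (j + 1)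
    simpa [Nat.cast_add] using this
  simp [delete_at, h1, h2, List.eraseIdx_eq_take_drop_succ]

lemma check_iff (s1 s2 : String) :
    check s1 s2 = true ↔ ∃ j, j < s1.toList.length ∧ s2 = delete_at s1 j := by
  unfold check
  by_cases hlen : s1.toList.length = s2.toList.length + 1
  · rw [if_neg (by omega)]
    rw [checkLoop_eq_greedy]
    simp only [List.drop_zero]
    rw [greedy_false_iff _ _ hlen]
    constructor
    · rintro ⟨j, hj, hb⟩
      refine ⟨j, hj, ?_⟩
      rw [← String.toList_inj, toList_delete_at]; exact hb
    · rintro ⟨j, hj, hb⟩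
      refine ⟨j, hj, ?_⟩
      rw [← toList_delete_at s1 j, String.toList_inj]; exact hb
  · rw [if_pos (by omega)]
    refine ⟨fun h => absurd h (by simp), ?_⟩
    rintro ⟨j, hj, hb⟩
    exfalso
    apply hlen
    have ht : s2.toList = (s1.toList).eraseIdx j := by rw [hb, toList_delete_at]
    have hl := congrArg List.length ht
    rw [List.length_eraseIdx, if_pos hj] at hl
    omega

-- the common shape of both inner loops: a "max-bump" fold
lemma bump_spec {α : Type} (P : α → Bool) (v : α → Int) (l : List α) (c : Int) :
    c ≤ l.foldl (fun acc p => if P p ∧ v p > acc then v p else acc) c ∧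
    (∀ p ∈ l, P p = true → v p ≤ l.foldl (fun acc p => if P p ∧ v p > acc then v p else acc) c) ∧
    (l.foldl (fun acc p => if P p ∧ v p > acc then v p else acc) c = c ∨
      ∃ p ∈ l, P p = true ∧ v p = l.foldl (fun acc p => if P p ∧ v p > acc then v p else acc) c) := by
  induction l generalizing c with
  | nil => simp
  | cons q l ih =>
      simp only [List.foldl_cons]
      obtain ⟨h1, h2, h3⟩ := ih (if P q ∧ v q > c then v q else c)
      refine ⟨?_, ?_, ?_⟩
      · refine le_trans ?_ h1
        split_ifs with hq
        · exact le_of_lt hq.2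
        · exact le_rfl
      · intro p hp hP
        rcases List.mem_cons.mp hp with rfl | hp'
        · refine le_trans ?_ h1
          split_ifs with hq
          · exact le_rfl
          · rcases not_and_or.mp hq with h | h
            · exact absurd hP h
            · exact le_of_not_gt h
        · exact h2 p hp' hP
      · by_cases hq : P q ∧ v q > c
        · rw [if_pos hq] at h3 ⊢
          rcases h3 with h3 | ⟨p, hp, hP, hv⟩
          · exact Or.inr ⟨q, List.mem_cons_self, hq.1, h3.symm⟩
          · exact Or.inr ⟨p, List.mem_cons_of_mem q hp, hP, hv⟩
        · rw [if_neg hq] at h3 ⊢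
          rcases h3 with h3 | ⟨p, hp, hP, hv⟩
          · exact Or.inl h3
          · exact Or.inr ⟨p, List.mem_cons_of_mem q hp, hP, hv⟩

lemma innerA_spec (arr : List String) (dp : List Int) (i : Nat) :
    dp.getD i 0 ≤ innerA arr dp i ∧
    (∀ p ∈ List.range i, check (arr.getD i "") (arr.getD p "") = true → 1 + dp.getD p 0 ≤ innerA arr dp i) ∧
    (innerA arr dp i = dp.getD i 0 ∨
      ∃ p ∈ List.range i, check (arr.getD i "") (arr.getD p "") = true ∧ 1 + dp.getD p 0 = innerA arr dp i) :=
  bump_spec (fun p => check (arr.getD i "") (arr.getD p "")) (fun p => 1 + dp.getD p 0)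
    (List.range i) (dp.getD i 0)

lemma innerB_spec (best : PySem.Dict String Int) (w : String) :
    1 ≤ innerB best w ∧
    (∀ j ∈ List.range w.toList.length, best.contains (delete_at w j) = true → best.getD (delete_at w j) 0 + 1 ≤ innerB best w) ∧
    (innerB best w = 1 ∨
      ∃ j ∈ List.range w.toList.length, best.contains (delete_at w j) = true ∧ best.getD (delete_at w j) 0 + 1 = innerB best w) :=
  bump_spec (fun j => best.contains (delete_at w j)) (fun j => best.getD (delete_at w j) 0 + 1)
    (List.range w.toList.length) 1

-- the dictionary invariant relating A's dp array to B's best map after i words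
def DictInv (arr : List String) (i : Nat) (dp : List Int) (best : PySem.Dict String Int) : Prop :=
  (∀ u v, best.get? u = some v → ∃ p, p < i ∧ arr.getD p "" = u ∧ dp.getD p 0 = v) ∧
  (∀ p, p < i → ∃ v, best.get? (arr.getD p "") = some v ∧ dp.getD p 0 ≤ v)

lemma inner_eq (arr : List String) (dp : List Int) (best : PySem.Dict String Int)
    (i : Nat) (w : String) (hw : arr.getD i "" = w)
    (hstart : dp.getD i 0 = 1) (hInv : DictInv arr i dp best) :
    innerA arr dp i = innerB best w := by
  obtain ⟨hA1, hA2, hA3⟩ := innerA_spec arr dp i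
  obtain ⟨hB1, hB2, hB3⟩ := innerB_spec best w
  apply le_antisymm
  · rcases hA3 with h | ⟨p, hp, hP, hv⟩
    · rw [h, hstart]; exact hB1
    · rw [← hv]
      rw [hw, check_iff] at hP
      rcases hP with ⟨j, hj, hd⟩
      have hpi : p < i := List.mem_range.mp hp
      rcases hInv.2 p hpi with ⟨v, hget, hle⟩
      rw [hd] at hget
      have hcont : best.contains (delete_at w j) = true := by
        rw [PySem.Dict.contains_eq_isSome_get?, hget]; rfl
      have hgd : best.getD (delete_at w j) 0 = v :=
        PySem.Dict.getD_of_get?_eq_some best 0 hget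
      have hb := hB2 j (List.mem_range.mpr hj) hcont
      rw [hgd] at hb
      omega
  · rcases hB3 with h | ⟨j, hj, hP, hv⟩
    · rw [h, ← hstart]; exact hA1
    · rw [← hv]
      rcases hget : best.get? (delete_at w j) with _ | v
      · rw [PySem.Dict.contains_eq_isSome_get?, hget] at hP; simp at hP
      · rcases hInv.1 _ _ hget with ⟨p, hpi, hwp, hdp⟩
        have hchk : check (arr.getD i "") (arr.getD p "") = true := by
          rw [hw, check_iff]
          exact ⟨j, List.mem_range.mp hj, by rw [hwp]⟩
        have ha := hA2 p (List.mem_range.mpr hpi) hchk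
        have hgd : best.getD (delete_at w j) 0 = v :=
          PySem.Dict.getD_of_get?_eq_some best 0 hget
        rw [hgd]
        omega

-- the main simulation: folding A over range' i k and B over the corresponding suffix of arr
lemma sim (arr : List String) (l : List String) (i : Nat) (dp : List Int)
    (best : PySem.Dict String Int) (m : Int)
    (hdrop : arr.drop i = l) (hlen : dp.length = arr.length)
    (hfresh : ∀ p, i ≤ p → p < arr.length → dp.getD p 0 = 1)
    (hInv : DictInv arr i dp best) :
    ((List.range' i l.length).foldl (stepA arr) (dp, m)).2 = (l.foldl stepB (best, m)).2 := by
  induction l generalizing i dp best m with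
  | nil => simp
  | cons w l' ih =>
      have hi : i < arr.length := by
        by_contra h
        rw [List.drop_eq_nil_of_le (by omega)] at hdrop
        exact absurd hdrop (by simp)
      have hwi : arr.getD i "" = w := by
        have h0 : (arr.drop i)[0]? = some w := by rw [hdrop]; rfl
        rw [List.getElem?_drop] at h0
        have h0' : arr[i]? = some w := by simpa using h0
        simp [List.getD_eq_getElem?_getD, h0']
      have hdrop' : arr.drop (i + 1) = l' := by
        have := congrArg List.tail hdrop
        simpa [List.tail_drop] using this
      simp only [List.length_cons, List.range'_succ, List.foldl_cons]
      have hcur : innerA arr dp i = innerB best w :=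
        inner_eq arr dp best i w hwi (hfresh i (le_refl i) hi) hInv
      set cur := innerB best w with hcurdef
      have hcur1 : 1 ≤ cur := by
        obtain ⟨hB1, _, _⟩ := bump_spec (fun j => best.contains (delete_at w j))
          (fun j => best.getD (delete_at w j) 0 + 1) (List.range w.toList.length) 1
        exact hB1
      have hstepA : stepA arr (dp, m) i = (dp.set i cur, if cur > m then cur else m) := by
        simp [stepA, hcur]
      have hstepB : stepB (best, m) w =
          (if cur > best.getD w 0 then best.insert w cur else best, if cur > m then cur else m) := by
        simp [stepB, ← hcurdef]
      rw [hstepA, hstepB]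
      -- facts about the new dp
      have hset_len : (dp.set i cur).length = arr.length := by simp [hlen]
      have hset_get : ∀ p, (dp.set i cur).getD p 0 = if p = i then cur else dp.getD p 0 := by
        intro p
        by_cases hpi : p = i
        · subst hpi
          simp [List.getD_eq_getElem?_getD, hlen, hi]
        · have hne : i ≠ p := fun h => hpi h.symm
          rw [if_neg hpi, List.getD_eq_getElem?_getD, List.getD_eq_getElem?_getD,
            List.getElem?_set_ne hne]
      apply ih (i + 1) (dp.set i cur) _ _ hdrop' hset_len
      · intro p hp hpn
        rw [hset_get p, if_neg (by omega)]
        exact hfresh p (by omega) hpn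
      · -- re-establish DictInv at i+1
        constructor
        · intro u v hget
          by_cases huw : u = w
          · subst huw
            by_cases hgt : cur > best.getD u 0
            · rw [if_pos hgt, PySem.Dict.get?_insert_self] at hget
              have hcv : cur = v := Option.some.inj hget
              refine ⟨i, by omega, hwi, ?_⟩
              rw [hset_get i, if_pos rfl, hcv]
            · rw [if_neg hgt] at hget
              rcases hInv.1 u v hget with ⟨p, hpi, hwp, hdp⟩
              exact ⟨p, by omega, hwp, by rw [hset_get p, if_neg (by omega)]; exact hdp⟩
          · have hget' : best.get? u = some v := by
              split_ifs at hget with hgt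
              · rwa [PySem.Dict.get?_insert_of_ne best cur huw] at hget
              · exact hget
            rcases hInv.1 u v hget' with ⟨p, hpi, hwp, hdp⟩
            exact ⟨p, by omega, hwp, by rw [hset_get p, if_neg (by omega)]; exact hdp⟩
        · intro p hp
          by_cases hpi : p = i
          · subst hpi
            rw [hwi]
            by_cases hgt : cur > best.getD w 0
            · refine ⟨cur, ?_, ?_⟩
              · rw [if_pos hgt, PySem.Dict.get?_insert_self]
              · rw [hset_get p, if_pos rfl]
            · -- cur ≤ best.getD w 0, and cur ≥ 1 > 0 so w is present
              rcases hgetw : best.get? w with _ | vOld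
              · have : best.getD w 0 = 0 := PySem.Dict.getD_of_get?_eq_none best 0 hgetw
                omega
              · have hgd : best.getD w 0 = vOld := PySem.Dict.getD_of_get?_eq_some best 0 hgetw
                refine ⟨vOld, ?_, ?_⟩
                · rw [if_neg hgt]; exact hgetw
                · rw [hset_get p, if_pos rfl]; omega
          · have hp' : p < i := by omega
            rcases hInv.2 p hp' with ⟨v, hget, hle⟩
            by_cases huw : arr.getD p "" = w
            · by_cases hgt : cur > best.getD w 0
              · refine ⟨cur, ?_, ?_⟩
                · rw [if_pos hgt, huw, PySem.Dict.get?_insert_self]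
                · rw [hset_get p, if_neg hpi]
                  have hgd := PySem.Dict.getD_of_get?_eq_some best 0 hget
                  rw [huw] at hgd
                  omega
              · exact ⟨v, by rw [if_neg hgt]; exact hget,
                  by rw [hset_get p, if_neg hpi]; exact hle⟩
            · refine ⟨v, ?_, by rw [hset_get p, if_neg hpi]; exact hle⟩
              split_ifs with hgt
              · rw [PySem.Dict.get?_insert_of_ne best cur huw]; exact hget
              · exact hget

-- ===== VERDICT (by name: the statement is the Claim_ definition above) =====
theorem longest_string_spec : Claim_equal_longest_string := by
  intro arr _
  show longest_string arr = longest_string_alt arr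
  unfold longest_string longest_string_alt
  rw [List.range_eq_range']
  have h := sim arr arr 0 (List.replicate arr.length 1) PySem.Dict.empty (-1)
    (by simp) (by simp)
    (fun p _ hp => by simp [List.getD_eq_getElem?_getD, hp])
    ⟨fun u v hget => by simp [PySem.Dict.get?_empty] at hget,
     fun p hp => by omega⟩
  simpa using h
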